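-- pv_equiv track=rewrite | github.com/AP-Yroki/srez-znaniy-october | task1.py | de_none
-- ===== SOURCE A (Python) =====
-- def de_none(lst):
--     test = 0
--     for i in lst:
--         if i == None:
--             test += 1
--
--     for i in range(test):
--         lst.remove(None)
--     return lst
-- ===== SOURCE B (Python) =====
-- def de_none(lst):
--     w = 0
--     for i in range(len(lst)):
--         x = lst[i]
--         if not (x == None):
--             lst[w] = x
--             w += 1
--     del lst[w:]
--     return lst
-- ===== Notes on version B (the rewrite author's own statement) =====
-- stated objective: faster
-- what changed: Replaces the count-then-repeated-lst.remove(None) scheme (each remove rescans and shifts the list) with a single-pass in-place two-pointer compaction: a write cursor copies each non-None element forward and the tail is truncated once.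
import Mathlib
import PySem

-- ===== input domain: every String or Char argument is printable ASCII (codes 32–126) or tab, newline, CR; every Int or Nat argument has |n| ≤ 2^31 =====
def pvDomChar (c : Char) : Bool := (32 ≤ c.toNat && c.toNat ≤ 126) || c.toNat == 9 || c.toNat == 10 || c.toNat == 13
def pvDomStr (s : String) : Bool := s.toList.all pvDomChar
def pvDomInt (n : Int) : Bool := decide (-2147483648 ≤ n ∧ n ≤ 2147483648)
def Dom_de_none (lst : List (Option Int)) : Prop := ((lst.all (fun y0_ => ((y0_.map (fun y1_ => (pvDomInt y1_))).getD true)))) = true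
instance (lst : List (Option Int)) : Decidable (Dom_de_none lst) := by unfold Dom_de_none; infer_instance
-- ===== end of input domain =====

-- B replaces count-then-repeated-remove(None) (quadratic) with a single in-place two-pointer
-- compaction pass; both Pythons mutate lst in place, the equivalence proved is about the return value.

-- ===== PORT A =====
-- A: count the Nones, then call lst.remove(None) that many times.
def de_none (lst : List (Option Int)) : List Int :=
  -- test = number of Nones; then `for i in range(test): lst.remove(None)` (remove? cannot fail here, getD is a totality guard)
  ((PySem.List.pyRange 0 (lst.foldl (fun t i => if i == none then t + 1 else t) 0) 1).foldl
    (fun l _ => (PySem.List.remove? l none).getD l) lst).reduceOption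

-- ===== PORT B =====
-- one iteration of B's loop body: x = lst[i]; if not (x == None): lst[w] = x; w += 1
def bStep (st : List (Option Int) × Nat) (i : Int) : List (Option Int) × Nat :=
  let x := (PySem.List.pyGet? st.1 i).getD none
  if x ≠ none then (st.1.set st.2 x, st.2 + 1) else (st.1, st.2)

def de_none_alt (lst : List (Option Int)) : List Int :=
  -- st = (lst after the pass, w); del lst[w:]; return lst
  (fun st : List (Option Int) × Nat => (st.1.take st.2).reduceOption)
    ((PySem.List.pyRange 0 (lst.length : Int) 1).foldl bStep (lst, 0))

-- ===== PRECONDITION & SPEC =====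
def Spec_de_none (lst : List (Option Int)) (out : List Int) : Prop := out = de_none_alt lst
instance (lst : List (Option Int)) (out : List Int) : Decidable (Spec_de_none lst out) := by unfold Spec_de_none; infer_instance

-- ===== CLAIM (what is proved, stated in full; the proofs are below) =====
def Claim_equal_de_none : Prop := ∀ (lst : List (Option Int)), Dom_de_none lst → Spec_de_none lst (de_none lst)

-- ===== LEMMAS AND PROOFS =====

-- ---- A side ----
def remStep (l : List (Option Int)) : List (Option Int) := (PySem.List.remove? l none).getD l

def iterN : Nat → List (Option Int) → List (Option Int)
  | 0, l => l
  | n+1, l => iterN n (remStep l)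

lemma countNone_foldl : ∀ (l : List (Option Int)) (t : Int),
    l.foldl (fun t i => if i == none then t + 1 else t) t = t + (l.count none : Int) := by
  intro l
  induction l with
  | nil => intro t; simp
  | cons x l ih =>
    intro t
    rw [List.foldl_cons, ih, List.count_cons]
    by_cases h : x = none
    · subst h; simp; ring
    · simp [h]

lemma foldl_const_iterN : ∀ (r : List Int) (l : List (Option Int)),
    r.foldl (fun l _ => remStep l) l = iterN r.length l := by
  intro r
  induction r with
  | nil => intro l; simp [iterN]
  | cons a r ih => intro l; simp [List.foldl, ih, iterN]

lemma iterN_cons_some : ∀ (c : Nat) (a : Int) (t : List (Option Int)),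
    c ≤ t.count none → iterN c (some a :: t) = some a :: iterN c t := by
  intro c
  induction c with
  | zero => intros; simp [iterN]
  | succ c ih =>
    intro a t hc
    have hmem : (none : Option Int) ∈ t := by
      have : 0 < t.count none := by omega
      exact List.count_pos_iff.mp this
    have hrem : PySem.List.remove? t none = some (t.erase none) :=
      PySem.List.remove?_eq_some_erase _ _ hmem
    have hcount : c ≤ (t.erase none).count none := by
      have := List.count_erase_self (a := (none : Option Int)) (l := t)
      omega
    show iterN c (remStep (some a :: t)) = some a :: iterN c (remStep t)
    rw [show remStep (some a :: t) = some a :: t.erase none from by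
        simp [remStep, PySem.List.remove?_cons_of_ne, hrem],
      show remStep t = t.erase none from by simp [remStep, hrem],
      ih a _ hcount]

lemma iterN_count : ∀ (l : List (Option Int)),
    iterN (l.count none) l = l.filter (·.isSome) := by
  intro l
  induction l with
  | nil => simp [iterN]
  | cons x t ih =>
    by_cases h : x = none
    · subst h
      have : ((none : Option Int) :: t).count none = t.count none + 1 := by
        simp
      rw [this]
      have hstep : remStep (none :: t) = t := by
        simp [remStep]
      simp [iterN, hstep, ih]
    · obtain ⟨a, rfl⟩ := Option.ne_none_iff_exists'.mp h
      have hcnt : ((some a : Option Int) :: t).count none = t.count none := by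
        simp
      rw [hcnt, iterN_cons_some _ _ _ (le_refl _), ih]
      simp

lemma reduceOption_filter_isSome : ∀ (l : List (Option Int)),
    (l.filter (·.isSome)).reduceOption = l.reduceOption := by
  intro l
  induction l with
  | nil => simp
  | cons x t ih =>
    cases x <;> simp [List.reduceOption] at ih ⊢ <;> simp [ih]

lemma de_none_eq : ∀ (l : List (Option Int)), de_none l = l.reduceOption := by
  intro l
  unfold de_none
  rw [countNone_foldl]
  have hr : (PySem.List.pyRange 0 (0 + (l.count none : Int)) 1).length = l.count none := by
    rw [PySem.List.length_pyRange_one]; omega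
  rw [show (fun (l : List (Option Int)) (_ : Int) => (PySem.List.remove? l none).getD l)
        = (fun l _ => remStep l) from rfl,
    foldl_const_iterN, hr, iterN_count, reduceOption_filter_isSome]

-- ---- B side ----
lemma set_append_len {α : Type} (F t : List α) (y : α) :
    (F ++ t).set F.length y = F ++ t.set 0 y := by
  induction F with
  | nil => simp
  | cons a F ih => simp [ih]

lemma bloop : ∀ (s F junk : List (Option Int)), (∀ x ∈ F, x.isSome) →
    ∃ junk' : List (Option Int),
      (PySem.List.pyRange ((F.length + junk.length : Nat) : Int)
          ((F.length + junk.length + s.length : Nat) : Int) 1).foldl bStep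
        (F ++ junk ++ s, F.length)
      = (F ++ s.filter (·.isSome) ++ junk', F.length + (s.filter (·.isSome)).length) := by
  intro s
  induction s with
  | nil =>
    intro F junk _
    refine ⟨junk, ?_⟩
    rw [PySem.List.pyRange_one_eq_nil (by simp)]
    simp
  | cons x s ih =>
    intro F junk hF
    have hlt : ((F.length + junk.length : Nat) : Int) < ((F.length + junk.length + (x :: s).length : Nat) : Int) := by
      push_cast [List.length_cons]; omega
    rw [PySem.List.pyRange_one_cons hlt]
    have hstep : bStep (F ++ junk ++ x :: s, F.length) ((F.length + junk.length : Nat) : Int)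
        = if x ≠ none then ((F ++ junk ++ x :: s).set F.length x, F.length + 1)
          else (F ++ junk ++ x :: s, F.length) := by
      simp only [bStep]
      rw [show ((F.length + junk.length : Nat) : Int) = (((F ++ junk).length : Nat) : Int) by simp,
        show F ++ junk ++ x :: s = (F ++ junk) ++ x :: s by simp,
        PySem.List.pyGet?_append_length]
      simp
    by_cases hx : x = none
    · subst hx
      rw [List.foldl_cons, hstep]
      simp only [ne_eq, not_true_eq_false, if_false]
      obtain ⟨junk', hj⟩ := ih F (junk ++ [none]) hF
      refine ⟨junk', ?_⟩
      have e1 : F ++ (junk ++ [none]) ++ s = F ++ junk ++ none :: s := by simp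
      have e2 : ((F.length + (junk ++ [none]).length : Nat) : Int) = ((F.length + junk.length : Nat) : Int) + 1 := by
        push_cast; simp; ring
      have e3 : ((F.length + (junk ++ [none]).length + s.length : Nat) : Int)
          = ((F.length + junk.length + (none :: s).length : Nat) : Int) := by
        push_cast; simp; ring
      rw [e1, e2, e3] at hj
      rw [hj]
      simp
    · obtain ⟨v, rfl⟩ := Option.ne_none_iff_exists'.mp hx
      rw [List.foldl_cons, hstep]
      simp only [ne_eq, reduceCtorEq, not_false_eq_true, if_true]
      -- the write lands on the first cell after F: new array = (F ++ [some v]) ++ junk2 ++ s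
      obtain ⟨junk2, harr, hlen⟩ :
          ∃ junk2 : List (Option Int),
            (F ++ junk ++ some v :: s).set F.length (some v) = (F ++ [some v]) ++ junk2 ++ s
            ∧ junk2.length = junk.length := by
        cases junk with
        | nil =>
          refine ⟨[], ?_, rfl⟩
          rw [show F ++ [] ++ some v :: s = F ++ (some v :: s) by simp, set_append_len]
          simp
        | cons j junk'' =>
          refine ⟨junk'' ++ [some v], ?_, by simp⟩
          rw [show F ++ (j :: junk'') ++ some v :: s = F ++ (j :: (junk'' ++ some v :: s)) by simp,
            set_append_len]
          simp
      rw [harr]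
      have hF' : ∀ y ∈ F ++ [some v], y.isSome := by
        intro y hy
        rcases List.mem_append.mp hy with h | h
        · exact hF y h
        · simp at h; subst h; rfl
      obtain ⟨junk', hj⟩ := ih (F ++ [some v]) junk2 hF'
      have e2 : (((F ++ [some v]).length + junk2.length : Nat) : Int) = ((F.length + junk.length : Nat) : Int) + 1 := by
        push_cast; simp [hlen]; ring
      have e3 : (((F ++ [some v]).length + junk2.length + s.length : Nat) : Int)
          = ((F.length + junk.length + (some v :: s).length : Nat) : Int) := by
        push_cast; simp [hlen]; ring
      rw [e2, e3] at hj
      simp only [List.length_append, List.length_cons, List.length_nil, Nat.zero_add] at hj ⊢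
      rw [hj]
      refine ⟨junk', ?_⟩
      simp
      omega

lemma de_none_alt_eq : ∀ (l : List (Option Int)), de_none_alt l = l.reduceOption := by
  intro l
  unfold de_none_alt
  obtain ⟨junk', hj⟩ := bloop l [] [] (by simp)
  simp only [List.nil_append, List.length_nil, Nat.zero_add, Nat.cast_zero] at hj
  simp only [hj]
  rw [show (l.filter (·.isSome) ++ junk').take (l.filter (·.isSome)).length
        = l.filter (·.isSome) from by
      exact List.take_left (l₁ := l.filter (·.isSome)) (l₂ := junk')]
  exact reduceOption_filter_isSome l

-- ===== VERDICT (by name: the statement is the Claim_ definition above) =====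
theorem de_none_spec : Claim_equal_de_none := by
  intro lst _
  unfold Spec_de_none
  rw [de_none_eq, de_none_alt_eq]
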